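-- pv_equiv track=rewrite | github.com/sobraldearruda/laboratorio-de-informatica-e-linguagens | banco-de-questoes/laboratorio-de-programacao-1/afinidade_musical.py | tem_afinidade
-- ===== SOURCE A (Python) =====
-- def tem_afinidade(l1, l2):
--     count = 0
--     for l in range(len(l1)):
--         for i in range(len(l2)):
--             if l1[l] == l2[i]:
--                 count += 1
--     if count >= 3:
--         return(True)
--     else:
--         return(False)
-- ===== SOURCE B (Python) =====
-- def tem_afinidade(l1, l2):
--     c1 = {}
--     for x in l1:
--         c1[x] = c1.get(x, 0) + 1
--     c2 = {}
--     for x in l2: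
--         c2[x] = c2.get(x, 0) + 1
--     total = 0
--     for v, k in c1.items():
--         total += k * c2.get(v, 0)
--     return total >= 3
-- ===== Notes on version B (the rewrite author's own statement) =====
-- stated objective: faster
-- what changed: Replaces the quadratic nested index scan by two frequency dictionaries built in one pass each, summing count1[v]*count2[v] over the distinct values of l1.
import Mathlib
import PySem

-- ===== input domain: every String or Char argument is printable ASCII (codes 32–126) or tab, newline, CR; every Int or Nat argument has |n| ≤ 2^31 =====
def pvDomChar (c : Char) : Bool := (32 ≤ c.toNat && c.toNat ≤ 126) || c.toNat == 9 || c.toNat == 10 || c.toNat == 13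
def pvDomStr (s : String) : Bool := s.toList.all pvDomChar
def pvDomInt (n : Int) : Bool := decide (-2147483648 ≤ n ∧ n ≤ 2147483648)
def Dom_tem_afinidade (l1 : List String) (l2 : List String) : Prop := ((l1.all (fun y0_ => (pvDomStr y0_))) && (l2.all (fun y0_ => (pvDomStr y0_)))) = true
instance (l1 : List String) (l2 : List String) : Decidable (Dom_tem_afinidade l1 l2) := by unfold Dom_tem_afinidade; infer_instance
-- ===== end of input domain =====

-- B replaces A's quadratic nested index scan by two one-pass frequency dictionaries
-- and sums count1[v]*count2[v] over the distinct values of l1 (objective: faster).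

-- ===== PORT A =====
def tem_afinidade (l1 : List String) (l2 : List String) : Bool :=
  let count : Int :=
    (PySem.List.pyRange 0 (PySem.List.len l1)).foldl
      (fun count l =>
        (PySem.List.pyRange 0 (PySem.List.len l2)).foldl
          (fun count i =>
            if PySem.List.pyGetD l1 l "" == PySem.List.pyGetD l2 i "" then count + 1 else count)
          count)
      0
  if count ≥ 3 then true else false

-- ===== PORT B =====
def tem_afinidade_alt (l1 : List String) (l2 : List String) : Bool :=
  let c1 : PySem.Dict String Int := l1.foldl (fun d x => d.insert x (d.getD x 0 + 1)) PySem.Dict.empty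
  let c2 : PySem.Dict String Int := l2.foldl (fun d x => d.insert x (d.getD x 0 + 1)) PySem.Dict.empty
  let total : Int := c1.items.foldl (fun total p => total + p.2 * c2.getD p.1 0) 0
  decide (total ≥ 3)

-- ===== PRECONDITION & SPEC =====
def Spec_tem_afinidade (l1 : List String) (l2 : List String) (out : Bool) : Prop := out = tem_afinidade_alt l1 l2
instance (l1 : List String) (l2 : List String) (out : Bool) : Decidable (Spec_tem_afinidade l1 l2 out) := by unfold Spec_tem_afinidade; infer_instance

-- ===== CLAIM (what is proved, stated in full; the proofs are below) =====
def Claim_equal_tem_afinidade : Prop := ∀ (l1 : List String) (l2 : List String), Dom_tem_afinidade l1 l2 → Spec_tem_afinidade l1 l2 (tem_afinidade l1 l2)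

-- ===== LEMMAS AND PROOFS =====

lemma toFinset_ofList (l : List String) : (PySem.Set.ofList l).toFinset = l.toFinset := by
  ext x
  simp [PySem.Set.mem_ofList]

-- grouping by value: Σ_{k ∈ distinct l1} count(k,l1)·count(k,l2) = Σ_{x ∈ l1} count(x,l2)
lemma sum_counts (l1 l2 : List String) :
    ((PySem.Set.ofList l1).map (fun k => ((List.count k l1 : Int)) * (List.count k l2 : Int))).sum
      = (l1.map (fun x => (List.count x l2 : Int))).sum := by
  rw [Finset.sum_list_map_count l1 (fun x => (List.count x l2 : Int))]
  rw [← toFinset_ofList, List.sum_toFinset _ (PySem.Set.nodup_ofList l1)]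
  simp

-- A's nested loop computes Σ_{x ∈ l1} count(x,l2)
lemma countA (l1 l2 : List String) :
    (PySem.List.pyRange 0 (PySem.List.len l1)).foldl
      (fun count l =>
        (PySem.List.pyRange 0 (PySem.List.len l2)).foldl
          (fun count i =>
            if PySem.List.pyGetD l1 l "" == PySem.List.pyGetD l2 i "" then count + 1 else count)
          count)
      0
    = (l1.map (fun x => (List.count x l2 : Int))).sum := by
  rw [PySem.List.foldl_pyRange_zero_pyGetD l1 ""
    (fun count x =>
      (PySem.List.pyRange 0 (PySem.List.len l2)).foldl
        (fun count i => if x == PySem.List.pyGetD l2 i "" then count + 1 else count) count) 0]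
  have hinner : ∀ (x : String) (a : Int),
      (PySem.List.pyRange 0 (PySem.List.len l2)).foldl
        (fun count i => if x == PySem.List.pyGetD l2 i "" then count + 1 else count) a
      = a + (List.count x l2 : Int) := by
    intro x a
    rw [PySem.List.foldl_pyRange_zero_pyGetD l2 ""
      (fun count y => if x == y then count + 1 else count) a]
    rw [PySem.List.foldl_count_if (fun y => x == y) l2 a]
    congr 1
    simp [List.count, BEq.comm]
  have : (List.foldl
      (fun count x =>
        (PySem.List.pyRange 0 (PySem.List.len l2)).foldl
          (fun count i => if x == PySem.List.pyGetD l2 i "" then count + 1 else count) count)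
      0 l1)
      = List.foldl (fun acc x => acc + (List.count x l2 : Int)) 0 l1 := by
    apply PySem.List.foldl_congr_mem
    intro a x _
    exact hinner x a
  rw [this, PySem.List.foldl_add l1 (fun x => (List.count x l2 : Int)) 0, zero_add]

-- B's pass over c1.items computes Σ_{k ∈ distinct l1} count(k,l1)·count(k,l2)
lemma countB (l1 l2 : List String) :
    ((l1.foldl (fun d x => d.insert x (d.getD x 0 + 1)) (PySem.Dict.empty : PySem.Dict String Int)).items.foldl
      (fun total p => total + p.2 * (l2.foldl (fun d x => d.insert x (d.getD x 0 + 1)) PySem.Dict.empty).getD p.1 0) 0)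
    = ((PySem.Set.ofList l1).map (fun k => ((List.count k l1 : Int)) * (List.count k l2 : Int))).sum := by
  rw [PySem.Dict.foldl_insert_getD_add_one_eq_counter l1, PySem.Dict.items_counter l1]
  have hget : ∀ (v : String),
      (l2.foldl (fun d x => d.insert x (d.getD x 0 + 1)) (PySem.Dict.empty : PySem.Dict String Int)).getD v 0
        = (List.count v l2 : Int) := by
    intro v
    rw [PySem.Dict.getD_foldl_insert_add_one l2 PySem.Dict.empty v]
    simp [PySem.Dict.empty, PySem.Dict.getD, PySem.Dict.get?]
  have h1 : (List.foldl
      (fun total p => total + p.2 * (l2.foldl (fun d x => d.insert x (d.getD x 0 + 1)) PySem.Dict.empty).getD p.1 0) 0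
      (List.map (fun k => (k, (List.count k l1 : Int))) (PySem.Set.ofList l1)))
      = List.foldl (fun total p => total + p.2 * (List.count p.1 l2 : Int)) 0
        (List.map (fun k => (k, (List.count k l1 : Int))) (PySem.Set.ofList l1)) := by
    apply PySem.List.foldl_congr_mem
    intro a p _
    rw [hget p.1]
  rw [h1, List.foldl_map]
  rw [PySem.List.foldl_add (PySem.Set.ofList l1)
    (fun k => ((List.count k l1 : Int)) * (List.count k l2 : Int)) 0, zero_add]

-- ===== VERDICT (by name: the statement is the Claim_ definition above) =====
theorem tem_afinidade_spec : Claim_equal_tem_afinidade := by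
  intro l1 l2 _
  unfold Spec_tem_afinidade tem_afinidade tem_afinidade_alt
  simp only [countA, countB, sum_counts]
  split <;> simp_all
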